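-- pv_equiv track=rewrite | github.com/alex-precosky/AdventOfCode2017 | day11/day11.py | cancel_adjacent_movements_2
-- ===== SOURCE A (Python) =====
-- from itertools import compress
--
-- def get_adjacent_resultant(movement1, movement2):
--     if (movement1 == "n" and movement2 == "se") or \
--        (movement1 == "se" and movement2 == "n"):
--         return "ne"
--
--     if(movement1 == "ne" and movement2 == "s") or \
--        (movement1 == "s" and movement2 == "ne"):
--         return "se"
--
--     if(movement1 == "se" and movement2 == "sw") or \
--        (movement1 == "sw" and movement2 == "se"):
--         return "s"
--
--     if(movement1 == "s" and movement2 == "nw") or \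
--        (movement1 == "nw" and movement2 == "s"):
--         return "sw"
--
--     if(movement1 == "sw" and movement2 == "n") or \
--        (movement1 == "n" and movement2 == "sw"):
--         return "nw"
--
--     if(movement1 == "nw" and movement2 == "ne") or \
--        (movement1 == "ne" and movement2 == "nw"):
--         return "n"
--
--     # if we reach here, there's no adjacency
--     return None
--
-- def cancel_adjacent_movements_2(movements):
--     # for each movement, look for a movement that could be cancelle dout
--
--     # mark which movements we'll elminate
--     keep = [True for i in range(len(movements))]
--
--     # and elements we'll add
--     replacements = []
--
--     for i, movement_i in enumerate(movements):
--         j = i+1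
--         for movement_j in movements[i+1:]:
--
--             if keep[i] != False and keep[j] != False:
--                 resultant = get_adjacent_resultant(movement_i, movement_j)
--                 if resultant is not None:
--                     keep[i] = False
--                     keep[j] = False
--                     replacements.append(resultant)
--             j += 1
--
--     return_list = list(compress(movements, keep))
--     return_list.extend(replacements)
--     return return_list
-- ===== SOURCE B (Python) =====
-- # B: worklist algorithm -- pop the front movement, cancel it against the first
-- # remaining hex-adjacent partner (dict lookup) or keep it; no keep-mask/compress.
-- _RESULTANT = {}
-- for _a, _b, _r in [("n", "se", "ne"), ("ne", "s", "se"), ("se", "sw", "s"),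
--                    ("s", "nw", "sw"), ("sw", "n", "nw"), ("nw", "ne", "n")]:
--     _RESULTANT[(_a, _b)] = _r
--     _RESULTANT[(_b, _a)] = _r
--
--
-- def cancel_adjacent_movements_2(movements):
--     pending = list(movements)
--     kept = []
--     replacements = []
--     while pending:
--         x = pending.pop(0)
--         for k, y in enumerate(pending):
--             r = _RESULTANT.get((x, y))
--             if r is not None:
--                 del pending[k]
--                 replacements.append(r)
--                 break
--         else:
--             kept.append(x)
--     return kept + replacements
-- ===== Notes on version B (the rewrite author's own statement) =====
-- stated objective: simpler
-- what changed: A's keep-mask over indices with a full O(n^2) enumerate/inner-scan pass plus itertools.compress reassembly is replaced by a worklist loop that pops the front movement and either cancels it against the first remaining hex-adjacent partner (looked up in a precomputed pair->resultant dict) or keeps it; no index bookkeeping, no mask, no compress.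
import Mathlib
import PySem

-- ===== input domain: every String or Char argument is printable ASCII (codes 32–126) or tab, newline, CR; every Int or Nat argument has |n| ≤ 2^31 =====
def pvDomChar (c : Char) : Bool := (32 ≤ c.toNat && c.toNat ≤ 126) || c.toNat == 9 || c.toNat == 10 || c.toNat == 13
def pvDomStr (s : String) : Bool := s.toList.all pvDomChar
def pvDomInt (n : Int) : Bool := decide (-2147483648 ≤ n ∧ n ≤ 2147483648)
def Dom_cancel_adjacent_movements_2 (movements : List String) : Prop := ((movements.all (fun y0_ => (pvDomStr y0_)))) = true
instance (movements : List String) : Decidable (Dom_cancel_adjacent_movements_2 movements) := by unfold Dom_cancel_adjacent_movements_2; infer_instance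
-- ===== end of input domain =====

-- B replaces A's keep-mask + quadratic marking passes by a worklist loop that pops the
-- front movement and cancels it against the first remaining hex-adjacent partner
-- (objective: simpler / alternative decomposition, same asymptotic cost).

-- ===== PORT A =====
def getAdjacentResultant (movement1 movement2 : String) : Option String :=
  if (movement1 = "n" ∧ movement2 = "se") ∨ (movement1 = "se" ∧ movement2 = "n") then some "ne"
  else if (movement1 = "ne" ∧ movement2 = "s") ∨ (movement1 = "s" ∧ movement2 = "ne") then some "se"
  else if (movement1 = "se" ∧ movement2 = "sw") ∨ (movement1 = "sw" ∧ movement2 = "se") then some "s"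
  else if (movement1 = "s" ∧ movement2 = "nw") ∨ (movement1 = "nw" ∧ movement2 = "s") then some "sw"
  else if (movement1 = "sw" ∧ movement2 = "n") ∨ (movement1 = "n" ∧ movement2 = "sw") then some "nw"
  else if (movement1 = "nw" ∧ movement2 = "ne") ∨ (movement1 = "ne" ∧ movement2 = "nw") then some "n"
  else none

-- itertools.compress(movements, keep): elements of `movements` whose selector is True
def pyCompress (xs : List String) (sel : List Bool) : List String :=
  (xs.zip sel).filterMap (fun p => if p.2 then some p.1 else none)

-- body of A's inner `for movement_j in movements[i+1:]` loop; state = (j, keep, replacements)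
def aInner (movement_i : String) (i : Int) (t : Int × List Bool × List String)
    (movement_j : String) : Int × List Bool × List String :=
  match t with
  | (j, keep, reps) =>
    if (PySem.List.pyGetD keep i false && PySem.List.pyGetD keep j false) = true then
      match getAdjacentResultant movement_i movement_j with
      | some r => (j + 1, PySem.List.pySetD (PySem.List.pySetD keep i false) j false, reps ++ [r])
      | none => (j + 1, keep, reps)
    else (j + 1, keep, reps)

-- body of A's outer `for i, movement_i in enumerate(movements)` loop; state = (keep, replacements)
def aOuter (movements : List String) (st : List Bool × List String) (p : Int × String) :
    List Bool × List String :=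
  match p with
  | (i, movement_i) =>
    let t := (PySem.List.slice movements (some (i + 1)) none).foldl (aInner movement_i i)
      (i + 1, st.1, st.2)
    (t.2.1, t.2.2)

def cancel_adjacent_movements_2 (movements : List String) : List String :=
  -- keep[i] is read/written only at indices 0 ≤ i < len, so getD/set are exact here
  let keep := (PySem.List.pyRange 0 (movements.length : Int) 1).map (fun _ => true)
  let st := (PySem.List.enumerate movements 0).foldl (aOuter movements) (keep, ([] : List String))
  pyCompress movements st.1 ++ st.2

-- ===== PORT B =====
-- _RESULTANT, built pair by pair exactly as Source B's module-level loop inserts them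
def pvResultantTable : PySem.Dict (String × String) String :=
  PySem.Dict.ofList
    [(("n", "se"), "ne"), (("se", "n"), "ne"),
     (("ne", "s"), "se"), (("s", "ne"), "se"),
     (("se", "sw"), "s"), (("sw", "se"), "s"),
     (("s", "nw"), "sw"), (("nw", "s"), "sw"),
     (("sw", "n"), "nw"), (("n", "sw"), "nw"),
     (("nw", "ne"), "n"), (("ne", "nw"), "n")]

-- _RESULTANT.get((x, y))
def pvResultantGet (x y : String) : Option String := pvResultantTable.get? (x, y)

-- the inner `for k, y in enumerate(pending): … del pending[k]; break / else` scan: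
-- first y with a resultant is removed, returning (resultant, remaining pending)
def pvRemoveFirst (x : String) : List String → Option (String × List String)
  | [] => none
  | y :: t =>
    match pvResultantGet x y with
    | some r => some (r, t)
    | none =>
      match pvRemoveFirst x t with
      | some (r, t') => some (r, y :: t')
      | none => none

theorem pvRemoveFirst_length {x : String} {ys : List String} {r : String} {t : List String}
    (h : pvRemoveFirst x ys = some (r, t)) : t.length < ys.length := by
  induction ys generalizing r t with
  | nil => simp [pvRemoveFirst] at h
  | cons y ys ih =>
    simp only [pvRemoveFirst] at h
    cases hres : pvResultantGet x y with
    | some r' => rw [hres] at h; simp_all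
    | none =>
      rw [hres] at h
      cases hrec : pvRemoveFirst x ys with
      | none => rw [hrec] at h; simp at h
      | some p =>
        obtain ⟨r'', t''⟩ := p
        rw [hrec] at h
        simp at h
        obtain ⟨h1, h2⟩ := h
        subst h1; subst h2
        have := ih hrec
        simp; omega

-- Source B's `while pending:` loop; state = (pending, kept, replacements)
def pvLoop (pending kept replacements : List String) : List String × List String :=
  match pending with
  | [] => (kept, replacements)
  | x :: rest =>
    match hr : pvRemoveFirst x rest with
    | some (r, rest') => pvLoop rest' kept (replacements ++ [r])
    | none => pvLoop rest (kept ++ [x]) replacements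
termination_by pending.length
decreasing_by
  · have := pvRemoveFirst_length hr; simp; omega
  · simp

def cancel_adjacent_movements_2_alt (movements : List String) : List String :=
  let p := pvLoop movements [] []
  p.1 ++ p.2

-- ===== PRECONDITION & SPEC =====
def Spec_cancel_adjacent_movements_2 (movements : List String) (out : List String) : Prop := out = cancel_adjacent_movements_2_alt movements
instance (movements : List String) (out : List String) : Decidable (Spec_cancel_adjacent_movements_2 movements out) := by unfold Spec_cancel_adjacent_movements_2; infer_instance

-- ===== CLAIM (what is proved, stated in full; the proofs are below) =====
def Claim_equal_cancel_adjacent_movements_2 : Prop := ∀ (movements : List String), Dom_cancel_adjacent_movements_2 movements → Spec_cancel_adjacent_movements_2 movements (cancel_adjacent_movements_2 movements)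

-- ===== LEMMAS AND PROOFS =====

-- the two resultant helpers agree
theorem res_eq (m1 m2 : String) : getAdjacentResultant m1 m2 = pvResultantGet m1 m2 := by
  unfold getAdjacentResultant
  split_ifs with h1 h2 h3 h4 h5 h6
  · rcases h1 with ⟨hx, hy⟩ | ⟨hx, hy⟩ <;> (subst hx; subst hy; decide)
  · rcases h2 with ⟨hx, hy⟩ | ⟨hx, hy⟩ <;> (subst hx; subst hy; decide)
  · rcases h3 with ⟨hx, hy⟩ | ⟨hx, hy⟩ <;> (subst hx; subst hy; decide)
  · rcases h4 with ⟨hx, hy⟩ | ⟨hx, hy⟩ <;> (subst hx; subst hy; decide)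
  · rcases h5 with ⟨hx, hy⟩ | ⟨hx, hy⟩ <;> (subst hx; subst hy; decide)
  · rcases h6 with ⟨hx, hy⟩ | ⟨hx, hy⟩ <;> (subst hx; subst hy; decide)
  · symm
    simp [pvResultantGet, pvResultantTable, PySem.Dict.get?, PySem.Dict.ofList,
      PySem.Dict.update, PySem.Dict.empty, PySem.Dict.insert, PySem.Dict.contains]
    push Not at h1 h2 h3 h4 h5 h6
    aesop

-- clean structural reference recursion shared by both bridge proofs
def solve : List String → List String × List String
  | [] => ([], [])
  | x :: rest =>
    match hr : pvRemoveFirst x rest with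
    | some (r, rest') => ((solve rest').1, r :: (solve rest').2)
    | none => (x :: (solve rest).1, (solve rest).2)
termination_by l => l.length
decreasing_by
  · have := pvRemoveFirst_length hr; simp; omega
  · simp

theorem pvLoop_solve (pending kept reps : List String) :
    pvLoop pending kept reps = (kept ++ (solve pending).1, reps ++ (solve pending).2) := by
  cases pending with
  | nil => simp [pvLoop, solve]
  | cons x rest =>
    rw [pvLoop, solve]
    cases hr : pvRemoveFirst x rest with
    | none => simp only [hr]; rw [pvLoop_solve rest]; simp
    | some p =>
      obtain ⟨r, rest'⟩ := p
      simp only [hr]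
      rw [pvLoop_solve rest']
      simp
termination_by pending.length
decreasing_by
  · simp
  · have := pvRemoveFirst_length hr; simp; omega

theorem pyCompress_cons (x : String) (xs : List String) (b : Bool) (bs : List Bool) :
    pyCompress (x :: xs) (b :: bs) = if b then x :: pyCompress xs bs else pyCompress xs bs := by
  simp only [pyCompress, List.zip_cons_cons, List.filterMap_cons]
  cases b <;> simp

theorem pyCompress_all_true (xs : List String) :
    pyCompress xs (List.replicate xs.length true) = xs := by
  induction xs with
  | nil => rfl
  | cons x xs ih => simpa [List.replicate, pyCompress_cons] using ih

theorem inner_dead (mi : String) (i : Int) (l : List String) (j : Int)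
    (keep : List Bool) (reps : List String) (h : PySem.List.pyGetD keep i false = false) :
    l.foldl (aInner mi i) (j, keep, reps) = (j + l.length, keep, reps) := by
  induction l generalizing j with
  | nil => simp
  | cons mj t ih =>
    simp only [List.foldl_cons, aInner, h, Bool.false_and]
    simpa [add_assoc, add_comm, add_left_comm] using ih (j + 1)

theorem inner_live_none (mi : String) (i : Nat) (l : List String) (j : Nat)
    (keep : List Bool) (reps : List String)
    (hij : i < j) (hi : keep.getD i false = true) (hlen : keep.length = j + l.length)
    (hrf : pvRemoveFirst mi (pyCompress l (keep.drop j)) = none) :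
    l.foldl (aInner mi i) ((j : Int), keep, reps) = ((j : Int) + l.length, keep, reps) := by
  induction l generalizing j reps with
  | nil => simp
  | cons mj t ih =>
    have hjlt : j < keep.length := by simp at hlen; omega
    have hdrop : keep.drop j = keep[j] :: keep.drop (j + 1) := List.drop_eq_getElem_cons hjlt
    rw [hdrop, pyCompress_cons] at hrf
    have hgi : PySem.List.pyGetD keep (i : Int) false = true := by
      simpa using hi
    have hgj : PySem.List.pyGetD keep (j : Int) false = keep[j] := by
      simp [List.getD, List.getElem?_eq_getElem hjlt]
    simp only [List.foldl_cons, aInner, hgi, hgj, Bool.true_and]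
    by_cases hkj : keep[j] = true
    · rw [if_pos hkj] at hrf ⊢
      simp only [pvRemoveFirst] at hrf
      cases hres : pvResultantGet mi mj with
      | some r => rw [hres] at hrf; simp at hrf
      | none =>
        rw [hres] at hrf
        cases hrec : pvRemoveFirst mi (pyCompress t (keep.drop (j + 1))) with
        | some p => rw [hrec] at hrf; simp at hrf
        | none =>
          rw [res_eq, hres]
          have := ih (j + 1) reps (by omega) (by simp at hlen; omega) hrec
          rw [show ((j : Int) + 1) = ((j + 1 : Nat) : Int) by push_cast; ring, this]
          congr 1
          simp only [List.length_cons]; push_cast; ring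
    · rw [if_neg hkj] at hrf ⊢
      have := ih (j + 1) reps (by omega) (by simp at hlen; omega) hrf
      rw [show ((j : Int) + 1) = ((j + 1 : Nat) : Int) by push_cast; ring, this]
      congr 1
      simp only [List.length_cons]; push_cast; ring

theorem inner_live_some (mi : String) (i : Nat) (l : List String) (j : Nat)
    (keep : List Bool) (reps : List String) (r : String) (rest' : List String)
    (hij : i < j) (hi : keep.getD i false = true) (hlen : keep.length = j + l.length)
    (hrf : pvRemoveFirst mi (pyCompress l (keep.drop j)) = some (r, rest')) :
    ∃ keep', l.foldl (aInner mi i) ((j : Int), keep, reps) = ((j : Int) + l.length, keep', reps ++ [r]) ∧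
      keep'.length = keep.length ∧
      (∀ p : Nat, p < j → p ≠ i → keep'.getD p false = keep.getD p false) ∧
      keep'.getD i false = false ∧
      pyCompress l (keep'.drop j) = rest' := by
  induction l generalizing j reps r rest' with
  | nil => simp [pyCompress, pvRemoveFirst] at hrf
  | cons mj t ih =>
    have hjlt : j < keep.length := by simp at hlen; omega
    have hilt : i < keep.length := by omega
    have hdrop : keep.drop j = keep[j] :: keep.drop (j + 1) := List.drop_eq_getElem_cons hjlt
    rw [hdrop, pyCompress_cons] at hrf
    have hgi : PySem.List.pyGetD keep (i : Int) false = true := by simpa using hi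
    have hgj : PySem.List.pyGetD keep (j : Int) false = keep[j] := by
      simp [List.getD, List.getElem?_eq_getElem hjlt]
    simp only [List.foldl_cons, aInner, hgi, hgj, Bool.true_and]
    by_cases hkj : keep[j] = true
    · rw [if_pos hkj] at hrf ⊢
      simp only [pvRemoveFirst] at hrf
      cases hres : pvResultantGet mi mj with
      | some r0 =>
        rw [hres] at hrf
        simp only [Option.some.injEq, Prod.mk.injEq] at hrf
        obtain ⟨hr0, hrest⟩ := hrf
        subst hr0; subst hrest
        rw [res_eq, hres]
        simp only [PySem.List.pySetD_natCast]
        set K := (keep.set i false).set j false with hK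
        have hKi : K.getD i false = false := by
          simp [hK, List.getD_eq_getElem?_getD, List.getElem?_set_ne (by omega : j ≠ i),
            List.getElem?_set_self hilt]
        have hKdead : PySem.List.pyGetD K (i : Int) false = false := by simpa using hKi
        refine ⟨K, ?_, ?_, ?_, hKi, ?_⟩
        · rw [inner_dead mi i t _ K _ hKdead]
          congr 1
          simp only [List.length_cons]; push_cast; ring
        · simp [hK]
        · intro p hpj hpi
          simp [hK, List.getD_eq_getElem?_getD, List.getElem?_set_ne (by omega : j ≠ p),
            List.getElem?_set_ne (fun h => hpi h.symm)]
        · have hKlen : j < K.length := by simp [hK]; omega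
          have hKj : K[j] = false := by simp [hK, List.getElem_set_self]
          rw [List.drop_eq_getElem_cons hKlen, pyCompress_cons, hKj]
          simp only [Bool.false_eq_true, if_false]
          rw [hK, List.drop_set_of_lt (by omega : j < j + 1),
            List.drop_set_of_lt (by omega : i < j + 1)]
      | none =>
        rw [hres] at hrf
        cases hrec : pvRemoveFirst mi (pyCompress t (keep.drop (j + 1))) with
        | none => rw [hrec] at hrf; simp at hrf
        | some p =>
          obtain ⟨r1, t1⟩ := p
          rw [hrec] at hrf
          simp only [Option.some.injEq, Prod.mk.injEq] at hrf
          obtain ⟨hr1, hrest⟩ := hrf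
          subst hr1
          rw [res_eq, hres]
          obtain ⟨keep', hfold, hlen', hpres, hifalse, hcomp⟩ :=
            ih (j + 1) reps r1 t1 (by omega) (by simp at hlen; omega) hrec
          refine ⟨keep', ?_, hlen', ?_, hifalse, ?_⟩
          · rw [show ((j : Int) + 1) = ((j + 1 : Nat) : Int) by push_cast; ring, hfold]
            congr 1
            simp only [List.length_cons]; push_cast; ring
          · intro p hpj hpi
            exact hpres p (by omega) hpi
          · have hjlt' : j < keep'.length := by omega
            have hkj' : keep'[j] = true := by
              have := hpres j (by omega) (by omega)
              rw [List.getD_eq_getElem _ _ hjlt', List.getD_eq_getElem _ _ hjlt] at this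
              rw [this, hkj]
            rw [List.drop_eq_getElem_cons hjlt', pyCompress_cons, hkj']
            simp only [if_true]
            rw [hcomp, hrest]
    · rw [if_neg hkj] at hrf ⊢
      obtain ⟨keep', hfold, hlen', hpres, hifalse, hcomp⟩ :=
        ih (j + 1) reps r rest' (by omega) (by simp at hlen; omega) hrf
      refine ⟨keep', ?_, hlen', ?_, hifalse, ?_⟩
      · rw [show ((j : Int) + 1) = ((j + 1 : Nat) : Int) by push_cast; ring, hfold]
        congr 1
        simp only [List.length_cons]; push_cast; ring
      · intro p hpj hpi
        exact hpres p (by omega) hpi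
      · have hjlt' : j < keep'.length := by omega
        have hkj' : keep'[j] = false := by
          have := hpres j (by omega) (by omega)
          rw [List.getD_eq_getElem _ _ hjlt', List.getD_eq_getElem _ _ hjlt] at this
          rw [this]
          simpa using hkj
        rw [List.drop_eq_getElem_cons hjlt', pyCompress_cons, hkj']
        simp only [Bool.false_eq_true, if_false]
        exact hcomp

theorem solve_cons_some {x r : String} {rest rest' : List String}
    (h : pvRemoveFirst x rest = some (r, rest')) :
    solve (x :: rest) = ((solve rest').1, r :: (solve rest').2) := by
  rw [solve]
  split
  · rename_i r0 rest0 heq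
    rw [h] at heq
    simp only [Option.some.injEq, Prod.mk.injEq] at heq
    obtain ⟨h1, h2⟩ := heq
    subst h1; subst h2; rfl
  · rename_i heq
    rw [h] at heq
    simp at heq

theorem solve_cons_none {x : String} {rest : List String}
    (h : pvRemoveFirst x rest = none) :
    solve (x :: rest) = (x :: (solve rest).1, (solve rest).2) := by
  rw [solve]
  split
  · rename_i r0 rest0 heq
    rw [h] at heq
    simp at heq
  · rfl

theorem solve_cons_some_fst {x r : String} {rest rest' : List String}
    (h : pvRemoveFirst x rest = some (r, rest')) :
    (solve (x :: rest)).1 = (solve rest').1 := by rw [solve_cons_some h]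

theorem solve_cons_some_snd {x r : String} {rest rest' : List String}
    (h : pvRemoveFirst x rest = some (r, rest')) :
    (solve (x :: rest)).2 = r :: (solve rest').2 := by rw [solve_cons_some h]

theorem solve_cons_none_fst {x : String} {rest : List String}
    (h : pvRemoveFirst x rest = none) :
    (solve (x :: rest)).1 = x :: (solve rest).1 := by rw [solve_cons_none h]

theorem solve_cons_none_snd {x : String} {rest : List String}
    (h : pvRemoveFirst x rest = none) :
    (solve (x :: rest)).2 = (solve rest).2 := by rw [solve_cons_none h]

theorem outer_loop (movements : List String) (l : List String) (i : Nat)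
    (keep : List Bool) (reps : List String)
    (hl : l = movements.drop i) (hlen : keep.length = movements.length) :
    ((PySem.List.enumerate l (i : Int)).foldl (aOuter movements) (keep, reps)).1.length = keep.length ∧
    (∀ p : Nat, p < i →
      ((PySem.List.enumerate l (i : Int)).foldl (aOuter movements) (keep, reps)).1.getD p false = keep.getD p false) ∧
    pyCompress l (((PySem.List.enumerate l (i : Int)).foldl (aOuter movements) (keep, reps)).1.drop i)
      = (solve (pyCompress l (keep.drop i))).1 ∧
    ((PySem.List.enumerate l (i : Int)).foldl (aOuter movements) (keep, reps)).2
      = reps ++ (solve (pyCompress l (keep.drop i))).2 := by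
  induction l generalizing i keep reps with
  | nil => simp [pyCompress, solve, PySem.List.enumerate]
  | cons mi t ih =>
    have hlen2 : movements.length = i + t.length + 1 := by
      have := congrArg List.length hl
      simp at this
      omega
    have hilt : i < movements.length := by omega
    have ht : t = movements.drop (i + 1) := by
      have : movements.drop (i + 1) = (movements.drop i).drop 1 := by
        rw [List.drop_drop]
      rw [this, ← hl, List.drop_one, List.tail_cons]
    have hcast : ((i : Int) + 1) = ((i + 1 : Nat) : Int) := by push_cast; ring
    simp only [PySem.List.enumerate_cons, List.foldl_cons, aOuter, hcast,
      PySem.List.slice_from_natCast, ← ht]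
    have hkdropi : keep.drop i = keep[i] :: keep.drop (i + 1) :=
      List.drop_eq_getElem_cons (by omega)
    by_cases hki : keep.getD i false = true
    · have hkielem : keep[i] = true := by
        rwa [List.getD_eq_getElem _ _ (by omega : i < keep.length)] at hki
      cases hrf : pvRemoveFirst mi (pyCompress t (keep.drop (i + 1))) with
      | none =>
        rw [inner_live_none mi i t (i + 1) keep reps (by omega) hki (by omega) hrf]
        obtain ⟨ihlen, ihpres, ihcomp, ihreps⟩ := ih (i + 1) keep reps ht hlen
        refine ⟨ihlen, ?_, ?_, ?_⟩
        · intro p hp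
          exact ihpres p (by omega)
        · rw [hkdropi, pyCompress_cons, hkielem, if_pos rfl, solve_cons_none_fst hrf]
          have hflt : i < ((PySem.List.enumerate t ((i + 1 : Nat) : Int)).foldl
              (aOuter movements) (keep, reps)).1.length := by rw [ihlen]; omega
          rw [List.drop_eq_getElem_cons hflt, pyCompress_cons]
          have : ((PySem.List.enumerate t ((i + 1 : Nat) : Int)).foldl
              (aOuter movements) (keep, reps)).1[i] = true := by
            have := ihpres i (by omega)
            rwa [List.getD_eq_getElem _ _ hflt,
              List.getD_eq_getElem _ _ (by omega : i < keep.length), hkielem] at this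
          rw [this, if_pos rfl, ihcomp]
        · rw [hkdropi, pyCompress_cons, hkielem, if_pos rfl, solve_cons_none_snd hrf]
          exact ihreps
      | some p =>
        obtain ⟨r, rest'⟩ := p
        obtain ⟨keep'', hfold, hlen'', hpres'', hifalse'', hcomp''⟩ :=
          inner_live_some mi i t (i + 1) keep reps r rest' (by omega) hki (by omega) hrf
        rw [hfold]
        obtain ⟨ihlen, ihpres, ihcomp, ihreps⟩ :=
          ih (i + 1) keep'' (reps ++ [r]) ht (by omega)
        rw [hcomp''] at ihcomp
        refine ⟨by rw [ihlen]; omega, ?_, ?_, ?_⟩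
        · intro p hp
          rw [ihpres p (by omega), hpres'' p (by omega) (by omega)]
        · rw [hkdropi, pyCompress_cons, hkielem, if_pos rfl, solve_cons_some_fst hrf]
          have hflt : i < ((PySem.List.enumerate t ((i + 1 : Nat) : Int)).foldl
              (aOuter movements) (keep'', reps ++ [r])).1.length := by rw [ihlen]; omega
          rw [List.drop_eq_getElem_cons hflt, pyCompress_cons]
          have : ((PySem.List.enumerate t ((i + 1 : Nat) : Int)).foldl
              (aOuter movements) (keep'', reps ++ [r])).1[i] = false := by
            have := ihpres i (by omega)
            rwa [List.getD_eq_getElem _ _ hflt, hifalse''] at this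
          rw [this]
          simp only [Bool.false_eq_true, if_false]
          exact ihcomp
        · rw [hkdropi, pyCompress_cons, hkielem, if_pos rfl, solve_cons_some_snd hrf]
          rw [ihreps, hcomp'']
          simp
    · have hdead : PySem.List.pyGetD keep (i : Int) false = false := by
        simp only [PySem.List.pyGetD_natCast]
        simpa using hki
      rw [inner_dead mi (i : Int) t _ keep reps hdead]
      obtain ⟨ihlen, ihpres, ihcomp, ihreps⟩ := ih (i + 1) keep reps ht hlen
      have hkielem : keep[i] = false := by
        have := hki
        rwa [List.getD_eq_getElem _ _ (by omega : i < keep.length), Bool.not_eq_true] at this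
      refine ⟨ihlen, ?_, ?_, ?_⟩
      · intro p hp
        exact ihpres p (by omega)
      · rw [hkdropi, pyCompress_cons, hkielem]
        simp only [Bool.false_eq_true, if_false]
        have hflt : i < ((PySem.List.enumerate t ((i + 1 : Nat) : Int)).foldl
            (aOuter movements) (keep, reps)).1.length := by rw [ihlen]; omega
        rw [List.drop_eq_getElem_cons hflt, pyCompress_cons]
        have : ((PySem.List.enumerate t ((i + 1 : Nat) : Int)).foldl
            (aOuter movements) (keep, reps)).1[i] = false := by
          have := ihpres i (by omega)
          rwa [List.getD_eq_getElem _ _ hflt,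
            List.getD_eq_getElem _ _ (by omega : i < keep.length), hkielem] at this
        rw [this]
        simp only [Bool.false_eq_true, if_false]
        exact ihcomp
      · rw [hkdropi, pyCompress_cons, hkielem]
        simp only [Bool.false_eq_true, if_false]
        exact ihreps

-- ===== VERDICT (by name: the statement is the Claim_ definition above) =====
theorem cancel_adjacent_movements_2_spec : Claim_equal_cancel_adjacent_movements_2 := by
  intro movements _
  unfold Spec_cancel_adjacent_movements_2 cancel_adjacent_movements_2 cancel_adjacent_movements_2_alt
  simp only [pvLoop_solve, List.nil_append]
  have hkeep : (PySem.List.pyRange 0 (movements.length : Int) 1).map (fun _ => true)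
      = List.replicate movements.length true := by
    simp [PySem.List.pyRange_zero_natCast]
  rw [hkeep]
  obtain ⟨-, -, hcomp, hreps⟩ := outer_loop movements movements 0
    (List.replicate movements.length true) [] (List.drop_zero (l := movements)).symm (by simp)
  simp only [List.drop_zero] at hcomp hreps
  rw [pyCompress_all_true] at hcomp hreps
  rw [show ((0 : Nat) : Int) = (0 : Int) by simp] at hcomp hreps
  rw [hcomp, hreps]
  simp
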